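-- pv_equiv track=rewrite | github.com/Beat98/rl-ion-trap-tutorial | RUN_data_analysis.py | when_learned
-- ===== SOURCE A (Python) =====
-- def when_learned(data, limit):
--     for i in range(len(data)):
--
--         if i > limit:
--             m = 0
--             for n in range(i - limit, i):
--                 if data[n] == data[i]:
--                     m += 1
--
--             if m == limit:
--                 return i - limit
--             else:
--                 continue
-- ===== SOURCE B (Python) =====
-- def when_learned(data, limit):
--     run = 0
--     prev = None
--     for i, x in enumerate(data):
--         run = run + 1 if i > 0 and prev == x else 1
--         if run == limit + 1:
--             return i - limit
--         prev = x
--     return None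
-- ===== Notes on version B (the rewrite author's own statement) =====
-- stated objective: faster
-- what changed: B makes a single pass tracking the length of the current run of equal consecutive values (returning i-limit when the run reaches limit+1) instead of rescanning the previous limit elements for every index.
-- intended difference: On inputs whose first limit+1 elements are already all equal (0 <= limit < len(data)), A's strict 'i > limit' guard skips the window ending at index limit, so A returns a later start or None and can never return 0, while B returns the intended start index 0 of that run. — e.g. on when_learned([3, 3], 1): A returns none, B returns some 0
import Mathlib
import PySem

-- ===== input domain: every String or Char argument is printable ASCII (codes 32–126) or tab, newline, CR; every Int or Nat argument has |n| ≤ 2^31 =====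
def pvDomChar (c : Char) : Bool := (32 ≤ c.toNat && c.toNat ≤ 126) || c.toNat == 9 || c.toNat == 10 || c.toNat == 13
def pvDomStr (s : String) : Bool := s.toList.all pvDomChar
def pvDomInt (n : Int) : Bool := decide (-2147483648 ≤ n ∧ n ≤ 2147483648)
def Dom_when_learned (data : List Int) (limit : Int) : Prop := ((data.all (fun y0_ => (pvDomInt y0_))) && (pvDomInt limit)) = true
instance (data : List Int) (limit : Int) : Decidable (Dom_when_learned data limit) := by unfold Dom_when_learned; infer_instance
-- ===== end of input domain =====

-- B replaces A's per-index rescan of the previous `limit` elements by a single pass that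
-- tracks the length of the current run of equal consecutive values (objective: faster).

-- ===== PORT A =====
-- outer loop 'for i in range(len(data))' with early return, one step per index
def whenLearnedGo (data : List Int) (limit : Int) : List Int → Option Int
  | [] => none
  | i :: rest =>
    if limit < i then
      let m : Int := (PySem.List.pyRange (i - limit) i 1).foldl
        (fun m n => if PySem.List.pyGet? data n = PySem.List.pyGet? data i then m + 1 else m) 0
      if m = limit then some (i - limit) else whenLearnedGo data limit rest
    else whenLearnedGo data limit rest

def when_learned (data : List Int) (limit : Int) : Option Int :=
  whenLearnedGo data limit (PySem.List.pyRange 0 data.length 1)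

-- ===== PORT B =====
-- 'for i, x in enumerate(data)' carrying prev (None before the first element) and run
def whenLearnedAltGo (limit : Int) (prev : Option Int) (run i : Int) : List Int → Option Int
  | [] => none
  | x :: rest =>
    let run' : Int := if 0 < i ∧ prev = some x then run + 1 else 1
    if run' = limit + 1 then some (i - limit)
    else whenLearnedAltGo limit (some x) run' (i + 1) rest

def when_learned_alt (data : List Int) (limit : Int) : Option Int :=
  whenLearnedAltGo limit none 0 0 data

-- ===== PRECONDITION & SPEC =====
-- On inputs whose first limit+1 elements are already all equal (0 ≤ limit < len), A's strict
-- 'i > limit' guard skips the window ending at index limit, so A returns a later start or None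
-- and can never return 0, while B returns the intended start index 0 of that run.
def D_when_learned (data : List Int) (limit : Int) : Prop :=
  0 ≤ limit ∧ limit + 1 ≤ (data.length : Int) ∧
    ∀ j : Nat, j < limit.toNat → data.getD j 0 = data.getD limit.toNat 0
instance (data : List Int) (limit : Int) : Decidable (D_when_learned data limit) := by
  unfold D_when_learned; infer_instance

def Spec_when_learned (data : List Int) (limit : Int) (out : Option Int) : Prop :=
  ¬ D_when_learned data limit → out = when_learned_alt data limit
instance (data : List Int) (limit : Int) (out : Option Int) : Decidable (Spec_when_learned data limit out) := by
  unfold Spec_when_learned; infer_instance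

def pvDiffWitness_when_learned : List Int × Int := ([3, 3], 1)
def pvDiffWitnessOut_when_learned : (Option Int) × (Option Int) := (none, some 0)

-- ===== CLAIM (what is proved, stated in full; the proofs are below) =====
def Claim_unchanged_when_learned : Prop := ∀ (data : List Int) (limit : Int), Dom_when_learned data limit → Spec_when_learned data limit (when_learned data limit)
def Claim_changed_when_learned : Prop := Dom_when_learned (pvDiffWitness_when_learned.1) (pvDiffWitness_when_learned.2) ∧ D_when_learned (pvDiffWitness_when_learned.1) (pvDiffWitness_when_learned.2) ∧ when_learned (pvDiffWitness_when_learned.1) (pvDiffWitness_when_learned.2) = pvDiffWitnessOut_when_learned.1 ∧ when_learned_alt (pvDiffWitness_when_learned.1) (pvDiffWitness_when_learned.2) = pvDiffWitnessOut_when_learned.2 ∧ pvDiffWitnessOut_when_learned.1 ≠ pvDiffWitnessOut_when_learned.2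
def Claim_exact_when_learned : Prop := ∀ (data : List Int) (limit : Int), Dom_when_learned data limit → D_when_learned data limit → when_learned data limit ≠ when_learned_alt data limit

-- ===== LEMMAS AND PROOFS =====

-- length of the run of equal consecutive values of `data` ending at index k
def runlen (data : List Int) : Nat → Int
  | 0 => 1
  | k + 1 => if data.getD k 0 = data.getD (k + 1) 0 then runlen data k + 1 else 1

theorem runlen_pos (data : List Int) (k : Nat) : 1 ≤ runlen data k := by
  induction k with
  | zero => simp [runlen]
  | succ k ih => simp only [runlen]; split <;> omega

theorem runlen_le (data : List Int) (k : Nat) : runlen data k ≤ (k : Int) + 1 := by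
  induction k with
  | zero => simp [runlen]
  | succ k ih => simp only [runlen]; split <;> push_cast <;> omega

theorem runlen_step (data : List Int) (k : Nat) :
    runlen data (k + 1) ≤ runlen data k + 1 := by
  have := runlen_pos data k
  simp only [runlen]; split <;> omega

-- characterisation: the run ending at k has length > L iff the L elements before k equal data[k]
theorem runlen_ge_iff (data : List Int) (k L : Nat) :
    ((L : Int) + 1 ≤ runlen data k) ↔
      (L ≤ k ∧ ∀ j : Nat, k - L ≤ j → j < k → data.getD j 0 = data.getD k 0) := by
  induction k generalizing L with
  | zero =>
    simp only [runlen]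
    constructor
    · intro h
      have : L = 0 := by omega
      subst this; exact ⟨le_refl _, fun j h1 h2 => by omega⟩
    · rintro ⟨h, -⟩
      have : L = 0 := by omega
      subst this; norm_num
  | succ k ih =>
    have hstep : runlen data (k + 1) = if data.getD k 0 = data.getD (k + 1) 0 then runlen data k + 1 else 1 := rfl
    by_cases h : data.getD k 0 = data.getD (k + 1) 0
    · rw [hstep, if_pos h]
      rcases Nat.eq_zero_or_pos L with hL | hL
      · subst hL
        have := runlen_pos data k
        constructor
        · intro _; exact ⟨by omega, fun j h1 h2 => by omega⟩
        · intro _; omega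
      · obtain ⟨M, rfl⟩ : ∃ M, L = M + 1 := ⟨L - 1, by omega⟩
        have hcast : ((((M + 1 : Nat)) : Int) + 1 ≤ runlen data k + 1) ↔ (((M : Nat) : Int) + 1 ≤ runlen data k) := by push_cast; omega
        rw [hcast, ih]
        constructor
        · rintro ⟨h1, h2⟩
          refine ⟨by omega, fun j hj1 hj2 => ?_⟩
          rcases Nat.lt_or_ge j k with hj | hj
          · rw [h2 j (by omega) hj, h]
          · have : j = k := by omega
            subst this; exact h
        · rintro ⟨h1, h2⟩
          refine ⟨by omega, fun j hj1 hj2 => ?_⟩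
          rw [h2 j (by omega) (by omega), ← h]
    · rw [hstep, if_neg h]
      constructor
      · intro hle
        have : L = 0 := by omega
        subst this; exact ⟨by omega, fun j h1 h2 => by omega⟩
      · rintro ⟨h1, h2⟩
        rcases Nat.eq_zero_or_pos L with hL | hL
        · subst hL; norm_num
        · exact absurd (h2 k (by omega) (by omega)) h

-- ---------- A-side characterisation ----------

def goodA (data : List Int) (limit : Int) (i : Int) : Bool :=
  decide (limit < i) &&
    decide ((((PySem.List.pyRange (i - limit) i 1).countP
      (fun n => decide (PySem.List.pyGet? data n = PySem.List.pyGet? data i))) : Int) = limit)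

theorem foldl_count (p : Int → Prop) [DecidablePred p] (l : List Int) (c : Int) :
    l.foldl (fun m n => if p n then m + 1 else m) c = c + l.countP (fun n => decide (p n)) := by
  induction l generalizing c with
  | nil => simp
  | cons x xs ih =>
    simp only [List.foldl_cons, List.countP_cons, ih]
    by_cases h : p x <;> simp [h]
    ring

theorem whenLearnedGo_eq_find? (data : List Int) (limit : Int) (l : List Int) :
    whenLearnedGo data limit l = (l.find? (goodA data limit)).map (fun i => i - limit) := by
  induction l with
  | nil => simp [whenLearnedGo]
  | cons i rest ih =>
    simp only [whenLearnedGo]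
    by_cases hi : limit < i
    · rw [if_pos hi]
      rw [foldl_count (fun n => PySem.List.pyGet? data n = PySem.List.pyGet? data i)]
      by_cases hm : (((PySem.List.pyRange (i - limit) i 1).countP
          (fun n => decide (PySem.List.pyGet? data n = PySem.List.pyGet? data i))) : Int) = limit
      · rw [if_pos (by omega)]
        have : goodA data limit i = true := by simp [goodA, hi, hm]
        simp [List.find?_cons_of_pos this]
      · rw [if_neg (by omega)]
        have : goodA data limit i = false := by simp [goodA, hm]
        rw [List.find?_cons_of_neg (by simp [this]), ih]
    · rw [if_neg hi]
      have : goodA data limit i = false := by simp [goodA]; intro h; omega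
      rw [List.find?_cons_of_neg (by simp [this]), ih]

theorem when_learned_eq_find? (data : List Int) (limit : Int) :
    when_learned data limit =
      ((List.range data.length).find? (fun k : Nat => goodA data limit (k : Int))).map
        (fun k : Nat => (k : Int) - limit) := by
  unfold when_learned
  rw [whenLearnedGo_eq_find?, PySem.List.pyRange_one, List.find?_map]
  simp [Option.map_map, Function.comp_def]

-- A never returns 0
theorem when_learned_ne_zero (data : List Int) (limit : Int) :
    when_learned data limit ≠ some 0 := by
  rw [when_learned_eq_find?]
  intro h
  rcases Option.map_eq_some_iff.mp h with ⟨k, hk, hv⟩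
  have hg := List.find?_some hk
  simp only [goodA, Bool.and_eq_true, decide_eq_true_eq] at hg
  omega

-- ---------- B-side characterisation ----------

def goodB (data : List Int) (limit : Int) (k : Nat) : Bool := decide (runlen data k = limit + 1)

theorem whenLearnedAltGo_inv (data : List Int) (limit : Int) :
    ∀ (rest : List Int) (k : Nat) (prev : Option Int) (run : Int),
      data.drop k = rest →
      (0 < k → prev = some (data.getD (k - 1) 0) ∧ run = runlen data (k - 1)) →
      whenLearnedAltGo limit prev run (k : Int) rest =
        ((List.range' k (data.length - k)).find? (goodB data limit)).map
          (fun j : Nat => (j : Int) - limit) := by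
  intro rest
  induction rest with
  | nil =>
    intro k prev run hdrop _
    have : data.length ≤ k := List.drop_eq_nil_iff.mp hdrop
    simp [whenLearnedAltGo, Nat.sub_eq_zero_of_le this]
  | cons x rest ih =>
    intro k prev run hdrop hinv
    have hk : k < data.length := by
      by_contra h
      rw [List.drop_eq_nil_iff.mpr (by omega)] at hdrop; exact absurd hdrop (by simp)
    have hx : data.getD k 0 = x := by
      have : data[k]? = some x := by
        rw [show data[k]? = (data.drop k)[0]? from by simp [List.getElem?_drop], hdrop]; rfl
      simp [List.getD_eq_getElem?_getD, this]
    have hdrop' : data.drop (k + 1) = rest := by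
      rw [← List.drop_drop, hdrop]; rfl
    have hlen : data.length - k = (data.length - (k + 1)) + 1 := by omega
    rw [hlen, List.range'_succ]
    simp only [whenLearnedAltGo]
    have hrun : (if 0 < (k : Int) ∧ prev = some x then run + 1 else 1) = runlen data k := by
      rcases Nat.eq_zero_or_pos k with hk0 | hk0
      · subst hk0; simp [runlen]
      · obtain ⟨m, rfl⟩ : ∃ m, k = m + 1 := ⟨k - 1, by omega⟩
        obtain ⟨hprev, hrun⟩ := hinv hk0
        simp only [Nat.add_sub_cancel] at hprev hrun
        by_cases heq : data.getD m 0 = data.getD (m + 1) 0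
        · rw [if_pos ⟨by positivity, by rw [hprev, ← hx]; exact congrArg some heq⟩, hrun,
            show runlen data (m + 1) = if data.getD m 0 = data.getD (m + 1) 0 then runlen data m + 1 else 1 from rfl,
            if_pos heq]
        · rw [if_neg ?_, show runlen data (m+1) = (1:Int) from by rw [show runlen data (m+1) = if data.getD m 0 = data.getD (m+1) 0 then runlen data m + 1 else 1 from rfl, if_neg heq]]
          rintro ⟨-, hp⟩
          rw [hprev, ← hx] at hp
          exact heq (Option.some_injective _ hp)
    rw [hrun]
    by_cases hg : runlen data k = limit + 1
    · rw [if_pos hg, List.find?_cons_of_pos (by simp [goodB, hg])]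
      rfl
    · rw [if_neg hg, List.find?_cons_of_neg (by simp [goodB, hg])]
      have := ih (k + 1) (some x) (runlen data k) hdrop'
        (fun _ => ⟨by rw [Nat.add_sub_cancel, hx], by rw [Nat.add_sub_cancel]⟩)
      rw [show ((k : Int) + 1) = ((k + 1 : Nat) : Int) from by push_cast; ring]
      exact this

theorem when_learned_alt_eq_find? (data : List Int) (limit : Int) :
    when_learned_alt data limit =
      ((List.range data.length).find? (goodB data limit)).map (fun j : Nat => (j : Int) - limit) := by
  unfold when_learned_alt
  have := whenLearnedAltGo_inv data limit data 0 none 0 (by simp) (by omega)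
  simpa [List.range_eq_range'] using this

-- ---------- first-hit congruence ----------

theorem find?_range'_congr (p q : Nat → Bool)
    (hqp : ∀ j, q j = true → p j = true)
    (hpq : ∀ j, p j = true → (∀ i, i < j → p i = false) → q j = true) :
    ∀ (m s : Nat), (∀ i, i < s → p i = false) →
      (List.range' s m).find? p = (List.range' s m).find? q := by
  intro m
  induction m with
  | zero => intro s _; rfl
  | succ m ih =>
    intro s hpre
    rw [List.range'_succ]
    by_cases hp : p s = true
    · rw [List.find?_cons_of_pos hp, List.find?_cons_of_pos (hpq s hp hpre)]
    · have hq : ¬ q s = true := fun h => hp (hqp s h)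
      rw [List.find?_cons_of_neg (by simpa using hp),
        List.find?_cons_of_neg (by simpa using hq)]
      exact ih (s + 1) (fun i hi => by
        rcases Nat.lt_or_ge i s with h | h
        · exact hpre i h
        · have : i = s := by omega
          subst this; simpa using hp)

theorem find?_congr_mem {α : Type} (p q : α → Bool) :
    ∀ (l : List α), (∀ x ∈ l, p x = q x) → l.find? p = l.find? q := by
  intro l
  induction l with
  | nil => intro _; rfl
  | cons x xs ih =>
    intro h
    have hx := h x (by simp)
    by_cases hp : p x = true
    · rw [List.find?_cons_of_pos hp, List.find?_cons_of_pos (hx ▸ hp)]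
    · rw [List.find?_cons_of_neg (by simpa using hp),
        List.find?_cons_of_neg (by simp [← hx]; simpa using hp)]
      exact ih (fun y hy => h y (by simp [hy]))

-- ---------- bridging goodA to runlen ----------

theorem window_iff (data : List Int) (limit : Int) (hlim : 0 ≤ limit) (k : Nat)
    (hk : k < data.length) (hlt : limit < (k : Int)) :
    (∀ n ∈ PySem.List.pyRange ((k : Int) - limit) (k : Int) 1,
        PySem.List.pyGet? data n = PySem.List.pyGet? data (k : Int)) ↔
      limit + 1 ≤ runlen data k := by
  have hL : ((limit.toNat : Int)) = limit := Int.toNat_of_nonneg hlim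
  rw [show (limit + 1 : Int) = (limit.toNat : Int) + 1 from by omega, runlen_ge_iff]
  constructor
  · intro hall
    refine ⟨by omega, fun j hj1 hj2 => ?_⟩
    have hmem : (j : Int) ∈ PySem.List.pyRange ((k : Int) - limit) (k : Int) 1 :=
      PySem.List.mem_pyRange_one.mpr (by omega)
    have := hall _ hmem
    rw [PySem.List.pyGet?_natCast, PySem.List.pyGet?_natCast] at this
    simp [List.getD_eq_getElem?_getD, this]
  · rintro ⟨-, hwin⟩ n hn
    have hb := PySem.List.mem_pyRange_one.mp hn
    have hn0 : 0 ≤ n := by omega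
    obtain ⟨j, rfl⟩ : ∃ j : Nat, n = (j : Int) := ⟨n.toNat, by omega⟩
    have hlt' : j < k := by omega
    have := hwin j (by omega) hlt'
    rw [PySem.List.pyGet?_natCast, PySem.List.pyGet?_natCast,
      List.getElem?_eq_getElem (by omega), List.getElem?_eq_getElem hk]
    rw [List.getD_eq_getElem?_getD, List.getD_eq_getElem?_getD,
      List.getElem?_eq_getElem (by omega), List.getElem?_eq_getElem hk] at this
    simpa using this

theorem goodA_iff (data : List Int) (limit : Int) (hlim : 0 ≤ limit) (k : Nat)
    (hk : k < data.length) :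
    (goodA data limit (k : Int) = true) ↔
      (limit < (k : Int) ∧ limit + 1 ≤ runlen data k) := by
  simp only [goodA, Bool.and_eq_true, decide_eq_true_eq]
  constructor
  · rintro ⟨hlt, hcnt⟩
    refine ⟨hlt, (window_iff data limit hlim k hk hlt).mp ?_⟩
    have hlen : (PySem.List.pyRange ((k : Int) - limit) (k : Int) 1).length = limit.toNat := by
      rw [PySem.List.length_pyRange_one]; omega
    have : (PySem.List.pyRange ((k : Int) - limit) (k : Int) 1).countP
        (fun n => decide (PySem.List.pyGet? data n = PySem.List.pyGet? data (k : Int)))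
        = (PySem.List.pyRange ((k : Int) - limit) (k : Int) 1).length := by omega
    intro n hn
    simpa using List.countP_eq_length.mp this n hn
  · rintro ⟨hlt, hrun⟩
    refine ⟨hlt, ?_⟩
    have hall := (window_iff data limit hlim k hk hlt).mpr hrun
    have hlen : (PySem.List.pyRange ((k : Int) - limit) (k : Int) 1).length = limit.toNat := by
      rw [PySem.List.length_pyRange_one]; omega
    have : (PySem.List.pyRange ((k : Int) - limit) (k : Int) 1).countP
        (fun n => decide (PySem.List.pyGet? data n = PySem.List.pyGet? data (k : Int)))
        = (PySem.List.pyRange ((k : Int) - limit) (k : Int) 1).length :=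
      List.countP_eq_length.mpr (fun n hn => by simpa using hall n hn)
    omega

-- find? on range' returns t when t is in range, satisfies p, and nothing before it does
theorem find?_range'_eq_of_first (p : Nat → Bool) :
    ∀ (m s t : Nat), s ≤ t → t < s + m → p t = true →
      (∀ j, s ≤ j → j < t → p j = false) →
      (List.range' s m).find? p = some t := by
  intro m
  induction m with
  | zero => intro s t h1 h2; omega
  | succ m ih =>
    intro s t h1 h2 hp hfirst
    rw [List.range'_succ]
    rcases Nat.eq_or_lt_of_le h1 with rfl | hlt
    · rw [List.find?_cons_of_pos hp]
    · rw [List.find?_cons_of_neg (by simp [hfirst s (le_refl s) hlt])]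
      exact ih (s + 1) t (by omega) (by omega) hp (fun j hj1 hj2 => hfirst j (by omega) hj2)

-- ===== VERDICT (by name: the statement is the Claim_ definition above) =====
theorem when_learned_spec : Claim_unchanged_when_learned := by
  intro data limit _ hD
  rw [when_learned_eq_find?, when_learned_alt_eq_find?]
  by_cases hlim : 0 ≤ limit
  · have step1 : (List.range data.length).find? (fun k : Nat => goodA data limit (k : Int)) =
        (List.range data.length).find? (fun k => decide (limit + 1 ≤ runlen data k)) := by
      apply find?_congr_mem
      intro k hk
      rw [List.mem_range] at hk
      apply Bool.eq_iff_iff.mpr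
      rw [goodA_iff data limit hlim k hk]
      simp only [decide_eq_true_eq]
      constructor
      · exact fun h => h.2
      · intro h
        refine ⟨?_, h⟩
        have hss := (runlen_ge_iff data k limit.toNat).mp
          (by rw [Int.toNat_of_nonneg hlim]; exact h)
        by_contra hlt
        have hkL : k = limit.toNat := by omega
        exact hD ⟨hlim, by omega, fun j hj => by
          have := hss.2 j (by omega) (by omega)
          rwa [hkL] at this⟩
    rw [step1, List.range_eq_range']
    rw [find?_range'_congr (fun k => decide (limit + 1 ≤ runlen data k)) (goodB data limit)
      ?_ ?_ data.length 0 (fun i hi => by omega)]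
    · intro j hq
      simp only [goodB, decide_eq_true_eq] at hq ⊢
      omega
    · intro j hp hprev
      simp only [goodB, decide_eq_true_eq] at hp ⊢
      cases j with
      | zero =>
        have : runlen data 0 = 1 := rfl
        omega
      | succ j =>
        have h1 : ¬ (limit + 1 ≤ runlen data j) := by
          have := hprev j (by omega)
          simpa using this
        have h2 := runlen_step data j
        omega
  · have hA : (List.range data.length).find? (fun k : Nat => goodA data limit (k : Int)) = none := by
      rw [List.find?_eq_none]
      intro k _
      simp only [goodA, Bool.and_eq_true, decide_eq_true_eq, not_and]
      intro _
      have : (0 : Int) ≤ ((PySem.List.pyRange ((k : Int) - limit) (k : Int) 1).countP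
        (fun n => decide (PySem.List.pyGet? data n = PySem.List.pyGet? data (k : Int))) : Int) :=
        Int.natCast_nonneg _
      omega
    have hB : (List.range data.length).find? (goodB data limit) = none := by
      rw [List.find?_eq_none]
      intro k _
      simp only [goodB, decide_eq_true_eq]
      have := runlen_pos data k
      omega
    rw [hA, hB]

theorem when_learned_changed : Claim_changed_when_learned := by
  unfold Claim_changed_when_learned; decide

theorem when_learned_tight : Claim_exact_when_learned := by
  intro data limit _ hD
  obtain ⟨h0, hlen, hwin⟩ := hD
  have hL : ((limit.toNat : Int)) = limit := Int.toNat_of_nonneg h0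
  have hLlt : limit.toNat < data.length := by omega
  have hB : when_learned_alt data limit = some 0 := by
    rw [when_learned_alt_eq_find?, List.range_eq_range']
    rw [find?_range'_eq_of_first (goodB data limit) data.length 0 limit.toNat
      (by omega) (by omega) ?_ ?_]
    · simp [hL]
    · simp only [goodB, decide_eq_true_eq]
      have hge : (limit.toNat : Int) + 1 ≤ runlen data limit.toNat :=
        (runlen_ge_iff data limit.toNat limit.toNat).mpr
          ⟨le_refl _, fun j hj1 hj2 => hwin j hj2⟩
      have hle := runlen_le data limit.toNat
      omega
    · intro j _ hj
      simp only [goodB, decide_eq_false_iff_not]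
      have := runlen_le data j
      omega
  intro h
  rw [hB] at h
  exact when_learned_ne_zero data limit h
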